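-- pv_equiv track=rewrite | github.com/SSS-Says-Snek/ParaPac | src/ghost_ai.py | blinky_ai
-- ===== SOURCE A (Python) =====
-- def distance(pos1, pos2):
--     """
--     Calculates (x2-x1)^2 + (y2-y1)^2 (square rooting doesn't matter in this case,
--     it'll just slow things down)
--     """
--     return (pos2[0] - pos1[0]) ** 2 + (pos2[1] - pos1[1]) ** 2
--
-- def blinky_ai(tile_neighbors, pacman_pos):
--     """
--     Given all passable tile neighbors, and the pacman position,
--     return the direction of the move, and the next tile of the move
--     """
--     neighbor_dict = {}
--     rev_neighbor_dict = {}
--     for direction, neighbor in tile_neighbors.items():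
--         neighbor_distance = distance(pacman_pos, neighbor)
--         neighbor_dict[direction] = [neighbor_distance, neighbor]
--         rev_neighbor_dict[neighbor_distance] = [direction, neighbor]
--     distances = [value[0] for value in neighbor_dict.values()]
--     min_distance = min(distances)
--     min_distance_neighbor = rev_neighbor_dict[min_distance][1]
--     min_distance_direction = rev_neighbor_dict[min_distance][0]
--
--     return min_distance_neighbor, min_distance_direction
-- ===== SOURCE B (Python) =====
-- def blinky_ai(tile_neighbors, pacman_pos):
--     best = None
--     for direction, neighbor in tile_neighbors.items():
--         d = (neighbor[0] - pacman_pos[0]) ** 2 + (neighbor[1] - pacman_pos[1]) ** 2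
--         if best is None or d <= best[0]:
--             best = (d, neighbor, direction)
--     if best is None:
--         raise ValueError("blinky_ai: no neighbors")
--     return best[1], best[2]
-- ===== Notes on version B (the rewrite author's own statement) =====
-- stated objective: simpler
-- what changed: Replaces A's two auxiliary dictionaries plus a separate min-over-values pass with a single running-minimum scan over tile_neighbors.items(), updating on <= so ties resolve to the last entry exactly like A's distance-keyed dict overwrite; the empty dict, on which both A and B raise ValueError, is excluded by Pre_.
import Mathlib
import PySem

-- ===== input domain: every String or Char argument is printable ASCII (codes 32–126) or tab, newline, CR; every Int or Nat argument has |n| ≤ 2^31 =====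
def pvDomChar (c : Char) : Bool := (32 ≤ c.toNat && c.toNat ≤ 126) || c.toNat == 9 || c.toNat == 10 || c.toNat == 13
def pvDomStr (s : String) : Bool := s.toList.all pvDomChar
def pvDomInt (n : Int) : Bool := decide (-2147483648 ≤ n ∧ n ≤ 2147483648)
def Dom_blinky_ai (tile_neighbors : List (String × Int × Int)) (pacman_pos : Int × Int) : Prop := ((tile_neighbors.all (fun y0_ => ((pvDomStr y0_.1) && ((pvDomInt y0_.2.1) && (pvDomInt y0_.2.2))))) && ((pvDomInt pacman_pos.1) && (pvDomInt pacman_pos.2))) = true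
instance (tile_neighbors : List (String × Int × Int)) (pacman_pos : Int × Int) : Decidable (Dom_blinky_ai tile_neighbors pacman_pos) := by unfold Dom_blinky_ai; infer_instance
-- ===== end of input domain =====

-- B replaces A's two auxiliary dictionaries and separate min pass with one running-minimum
-- scan over the items (updating on ≤ so ties go to the last entry, like A's dict overwrite);
-- objective: simpler (a timing run also measured it faster by a constant factor).

-- ===== PORT A =====
def distance (pos1 pos2 : Int × Int) : Int :=
  (pos2.1 - pos1.1) ^ 2 + (pos2.2 - pos1.2) ^ 2

def blinky_ai (tile_neighbors : List (String × Int × Int)) (pacman_pos : Int × Int) : (Int × Int) × String :=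
  -- for direction, neighbor in tile_neighbors.items(): build neighbor_dict and rev_neighbor_dict
  let dicts := (PySem.Dict.ofList tile_neighbors).items.foldl
    (fun (st : PySem.Dict String (Int × (Int × Int)) × PySem.Dict Int (String × (Int × Int))) it =>
      let neighbor_distance := distance pacman_pos it.2
      (st.1.insert it.1 (neighbor_distance, it.2), st.2.insert neighbor_distance (it.1, it.2)))
    (PySem.Dict.empty, PySem.Dict.empty)
  let distances := dicts.1.values.map (fun v => v.1)
  match PySem.List.min? distances (fun y => y) with
  | none => ((0, 0), "")        -- Python: min([]) raises ValueError; excluded by Pre_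
  | some min_distance =>
    match dicts.2.get? min_distance with
    | none => ((0, 0), "")      -- unreachable: min_distance is always a key of rev_neighbor_dict
    | some dv => (dv.2, dv.1)

-- ===== PORT B =====
def blinky_ai_alt (tile_neighbors : List (String × Int × Int)) (pacman_pos : Int × Int) : (Int × Int) × String :=
  let best := (PySem.Dict.ofList tile_neighbors).items.foldl
    (fun (best : Option (Int × (Int × Int) × String)) it =>
      let d := (it.2.1 - pacman_pos.1) ^ 2 + (it.2.2 - pacman_pos.2) ^ 2
      match best with
      | none => some (d, it.2, it.1)
      | some b => if d ≤ b.1 then some (d, it.2, it.1) else some b)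
    none
  match best with
  | none => ((0, 0), "")        -- Python: raise ValueError; excluded by Pre_
  | some b => (b.2.1, b.2.2)

-- ===== PRECONDITION & SPEC =====
-- Pre_ excludes only the empty dict, on which A raises ValueError (min of an empty sequence);
-- B raises ValueError there too.
def Pre_blinky_ai (tile_neighbors : List (String × Int × Int)) (pacman_pos : Int × Int) : Prop :=
  tile_neighbors ≠ []
instance (tile_neighbors : List (String × Int × Int)) (pacman_pos : Int × Int) : Decidable (Pre_blinky_ai tile_neighbors pacman_pos) := by unfold Pre_blinky_ai; infer_instance

def pvWitness_blinky_ai : (List (String × Int × Int)) × (Int × Int) := ([("up", (1, 2))], (0, 0))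

def Spec_blinky_ai (tile_neighbors : List (String × Int × Int)) (pacman_pos : Int × Int) (out : (Int × Int) × String) : Prop := out = blinky_ai_alt tile_neighbors pacman_pos
instance (tile_neighbors : List (String × Int × Int)) (pacman_pos : Int × Int) (out : (Int × Int) × String) : Decidable (Spec_blinky_ai tile_neighbors pacman_pos out) := by unfold Spec_blinky_ai; infer_instance

-- ===== CLAIM (what is proved, stated in full; the proofs are below) =====
def Claim_equal_blinky_ai : Prop := ∀ (tile_neighbors : List (String × Int × Int)) (pacman_pos : Int × Int), Dom_blinky_ai tile_neighbors pacman_pos → Pre_blinky_ai tile_neighbors pacman_pos → Spec_blinky_ai tile_neighbors pacman_pos (blinky_ai tile_neighbors pacman_pos)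

-- ===== LEMMAS AND PROOFS =====

-- B's loop body, named for the proofs (definitionally the lambda in blinky_ai_alt)
def stepB (p : Int × Int) (best : Option (Int × (Int × Int) × String)) (it : String × Int × Int) :
    Option (Int × (Int × Int) × String) :=
  let d := (it.2.1 - p.1) ^ 2 + (it.2.2 - p.2) ^ 2
  match best with
  | none => some (d, it.2, it.1)
  | some b => if d ≤ b.1 then some (d, it.2, it.1) else some b

lemma keys_eq_items_map {κ ν : Type} [BEq κ] (d : PySem.Dict κ ν) :
    d.keys = d.items.map Prod.fst := by
  simp [PySem.Dict.keys]

lemma values_eq_items_map {κ ν : Type} [BEq κ] (d : PySem.Dict κ ν) :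
    d.values = d.items.map Prod.snd := by
  simp [PySem.Dict.values]

lemma min?_id_append (l : List Int) (a : Int) :
    PySem.List.min? (l ++ [a]) (fun y => y) =
      some (match PySem.List.min? l (fun y => y) with | none => a | some m => min m a) := by
  cases l with
  | nil => simp [PySem.List.min?]
  | cons y t => simp [PySem.List.min?_id_cons, List.foldl_append]

lemma mem_keys_foldl_insert {κ ν : Type} [BEq κ] [LawfulBEq κ]
    (l : List (κ × ν)) (d : PySem.Dict κ ν) (k : κ) (h : k ∈ d.keys) :
    k ∈ (l.foldl (fun d p => d.insert p.1 p.2) d).keys := by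
  induction l generalizing d with
  | nil => exact h
  | cons x t ih =>
    exact ih _ ((PySem.Dict.mem_keys_insert _ _ _ _).mpr (Or.inr h))

lemma items_ofList_ne_nil (l : List (String × Int × Int)) (h : l ≠ []) :
    (PySem.Dict.ofList l).items ≠ [] := by
  cases l with
  | nil => exact absurd rfl h
  | cons x t =>
    have hof : PySem.Dict.ofList (x :: t)
        = (x :: t).foldl (fun d p => d.insert p.1 p.2) PySem.Dict.empty := by
      simp [PySem.Dict.ofList, PySem.Dict.update]
    have hk : x.1 ∈ (PySem.Dict.ofList (x :: t)).keys := by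
      rw [hof]
      exact mem_keys_foldl_insert t _ x.1 ((PySem.Dict.mem_keys_insert _ _ _ _).mpr (Or.inl rfl))
    intro hnil
    rw [keys_eq_items_map, hnil] at hk
    simp at hk

lemma nodup_fst_items_ofList (l : List (String × Int × Int)) :
    ((PySem.Dict.ofList l).items.map Prod.fst).Nodup := by
  rw [← keys_eq_items_map]
  exact PySem.Dict.nodup_keys_ofList l

lemma A_items (p : Int × Int) (xs : List (String × Int × Int))
    (h : (xs.map Prod.fst).Nodup) :
    (xs.foldl (fun d it => d.insert it.1 (distance p it.2, it.2))
        (PySem.Dict.empty : PySem.Dict String (Int × (Int × Int)))).items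
      = xs.map (fun it => (it.1, (distance p it.2, it.2))) := by
  induction xs using List.reverseRecOn with
  | nil => simp [PySem.Dict.empty]
  | append_singleton xs x ih =>
    have h' : (xs.map Prod.fst).Nodup ∧ x.1 ∉ xs.map Prod.fst := by
      rw [List.map_append] at h
      exact ⟨h.of_append_left, fun hm => (List.disjoint_of_nodup_append h) hm (by simp)⟩
    have hitems := ih h'.1
    have hcont : (xs.foldl (fun d it => d.insert it.1 (distance p it.2, it.2))
        (PySem.Dict.empty : PySem.Dict String (Int × (Int × Int)))).contains x.1 = false := by
      rw [PySem.Dict.contains_eq_decide_mem_keys, keys_eq_items_map, hitems]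
      simp only [List.map_map]
      have : (xs.map (fun it => (it.1, (distance p it.2, it.2)))).map Prod.fst
          = xs.map Prod.fst := by simp [List.map_map, Function.comp]
      rw [← List.map_map]
      simp only [this]
      simpa using h'.2
    rw [List.foldl_append, List.foldl_cons, List.foldl_nil,
      PySem.Dict.items_insert, hcont, hitems, List.map_append]
    simp

lemma main_lemma (p : Int × Int) (xs : List (String × Int × Int)) (hne : xs ≠ []) :
    ∃ m nb dir,
      PySem.List.min? (xs.map (fun it => distance p it.2)) (fun y => y) = some m ∧
      (xs.foldl (fun d it => d.insert (distance p it.2) (it.1, it.2))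
          (PySem.Dict.empty : PySem.Dict Int (String × (Int × Int)))).get? m = some (dir, nb) ∧
      xs.foldl (stepB p) none = some (m, nb, dir) := by
  induction xs using List.reverseRecOn with
  | nil => exact absurd rfl hne
  | append_singleton xs x ih =>
    by_cases hxs : xs = []
    · subst hxs
      refine ⟨distance p x.2, x.2, x.1, ?_, ?_, ?_⟩
      · simp [PySem.List.min?_id_cons]
      · simp only [List.nil_append, List.foldl_cons, List.foldl_nil]
        rw [PySem.Dict.get?_insert]
        simp
      · simp [stepB, distance]
    · obtain ⟨m, nb, dir, hmin, hget, hfold⟩ := ih hxs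
      rw [List.map_append, List.foldl_append, List.foldl_append]
      simp only [List.map_cons, List.map_nil, List.foldl_cons, List.foldl_nil]
      rw [min?_id_append, hmin, hfold]
      by_cases hle : distance p x.2 ≤ m
      · refine ⟨distance p x.2, x.2, x.1, ?_, ?_, ?_⟩
        · simp [min_eq_right hle]
        · rw [PySem.Dict.get?_insert]
          simp
        · simp [stepB, distance] at hle ⊢
          simp [hle]
      · refine ⟨m, nb, dir, ?_, ?_, ?_⟩
        · simp [min_eq_left (le_of_not_ge hle)]
        · have hne' : m ≠ distance p x.2 := by omega
          rw [PySem.Dict.get?_insert]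
          simp only [if_neg hne']
          exact hget
        · simp [stepB, distance] at hle ⊢
          simp [hle]

-- ===== VERDICT (by name: the statement is the Claim_ definition above) =====
theorem blinky_ai_spec : Claim_equal_blinky_ai := by
  intro l p _ hpre
  unfold Spec_blinky_ai blinky_ai blinky_ai_alt
  have hne : (PySem.Dict.ofList l).items ≠ [] := items_ofList_ne_nil l hpre
  have hnd := nodup_fst_items_ofList l
  obtain ⟨m, nb, dir, hmin, hget, hfold⟩ := main_lemma p (PySem.Dict.ofList l).items hne
  have hsplit : ((PySem.Dict.ofList l).items.foldl
      (fun (st : PySem.Dict String (Int × (Int × Int)) × PySem.Dict Int (String × (Int × Int))) it =>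
        let neighbor_distance := distance p it.2
        (st.1.insert it.1 (neighbor_distance, it.2), st.2.insert neighbor_distance (it.1, it.2)))
      (PySem.Dict.empty, PySem.Dict.empty))
    = ((PySem.Dict.ofList l).items.foldl (fun d it => d.insert it.1 (distance p it.2, it.2)) PySem.Dict.empty,
       (PySem.Dict.ofList l).items.foldl (fun d it => d.insert (distance p it.2) (it.1, it.2)) PySem.Dict.empty) :=
    PySem.List.foldl_prod_mk
      (f := fun (d : PySem.Dict String (Int × (Int × Int))) (it : String × Int × Int) =>
        PySem.Dict.insert d it.1 (distance p it.2, it.2))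
      (g := fun (d : PySem.Dict Int (String × (Int × Int))) (it : String × Int × Int) =>
        PySem.Dict.insert d (distance p it.2) (it.1, it.2)) _ _ _
  have hBfold : (PySem.Dict.ofList l).items.foldl
      (fun (best : Option (Int × (Int × Int) × String)) it =>
        let d := (it.2.1 - p.1) ^ 2 + (it.2.2 - p.2) ^ 2
        match best with
        | none => some (d, it.2, it.1)
        | some b => if d ≤ b.1 then some (d, it.2, it.1) else some b) none
      = some (m, nb, dir) := hfold
  simp only [hsplit, hBfold]
  have hvals : (((PySem.Dict.ofList l).items.foldl
      (fun d it => d.insert it.1 (distance p it.2, it.2))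
      (PySem.Dict.empty : PySem.Dict String (Int × (Int × Int)))).values.map (fun v => v.1))
      = (PySem.Dict.ofList l).items.map (fun it => distance p it.2) := by
    rw [values_eq_items_map, A_items p _ hnd]
    simp [List.map_map, Function.comp]
  rw [hvals, hmin]
  simp [hget]
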